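-- pv_equiv track=rewrite | github.com/Matthew-Pidlysny/9-The-Final-Chapter | Solver (WIP)/workshops/workshop1_foundations.py | digit_product
-- ===== SOURCE A (Python) =====
-- def digit_product(n: int) -> int:
--     """Calculate product of digits"""
--     s = str(abs(n))
--     if '0' in s:
--         return 0
--     result = 1
--     for d in s:
--         result *= int(d)
--     return result
-- ===== SOURCE B (Python) =====
-- def digit_product(n: int) -> int:
--     """Calculate product of digits"""
--     m = abs(n)
--     if m == 0:
--         return 0
--     result = 1
--     while m:
--         d = m % 10
--         if d == 0:
--             return 0
--         result *= d
--         m //= 10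
--     return result
-- ===== Notes on version B (the rewrite author's own statement) =====
-- stated objective: alternative
-- what changed: B computes the digit product with pure integer arithmetic (repeated % 10 and // 10, least-significant first, with an early 0 return) instead of converting the number to a string and scanning its characters.
import Mathlib
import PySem

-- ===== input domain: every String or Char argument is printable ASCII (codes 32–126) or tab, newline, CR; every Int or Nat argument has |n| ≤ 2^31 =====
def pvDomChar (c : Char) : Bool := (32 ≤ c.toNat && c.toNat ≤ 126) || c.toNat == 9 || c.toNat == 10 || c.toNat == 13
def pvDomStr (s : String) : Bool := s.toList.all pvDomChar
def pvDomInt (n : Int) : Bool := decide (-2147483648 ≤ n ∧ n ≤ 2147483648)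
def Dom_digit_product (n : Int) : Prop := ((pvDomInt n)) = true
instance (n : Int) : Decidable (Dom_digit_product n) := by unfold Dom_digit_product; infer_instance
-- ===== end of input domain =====

-- B replaces A's string conversion by pure integer div/mod digit extraction; same cost, no string allocation.

-- ===== PORT A =====
-- int(d) for a single char of str(abs(n)) is always a digit, so ofChars? is always `some`
-- and `.getD 0` is exact here (the default is never used).
def digit_product (n : Int) : Int :=
  let s := PySem.Int.toChars |n|        -- s = str(abs(n)) as its character list
  if '0' ∈ s then 0
  else s.foldl (fun result d => result * ((PySem.Int.ofChars? [d]).getD 0)) 1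

-- ===== PORT B =====
-- the `while m:` loop of Source B; m = abs(n) is nonnegative, so it is tracked as a Nat
-- (Python's % and // on nonnegative ints coincide with Nat.mod / Nat.div).
def dpLoop (m : Nat) (result : Int) : Int :=
  if h : m = 0 then result
  else
    let d := m % 10
    if d = 0 then 0
    else dpLoop (m / 10) (result * d)
termination_by m
decreasing_by exact Nat.div_lt_self (Nat.pos_of_ne_zero h) (by norm_num)

def digit_product_alt (n : Int) : Int :=
  let m := n.natAbs
  if m = 0 then 0
  else dpLoop m 1

-- ===== PRECONDITION & SPEC =====
def Spec_digit_product (n : Int) (out : Int) : Prop := out = digit_product_alt n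
instance (n : Int) (out : Int) : Decidable (Spec_digit_product n out) := by unfold Spec_digit_product; infer_instance

-- ===== CLAIM (what is proved, stated in full; the proofs are below) =====
def Claim_equal_digit_product : Prop := ∀ (n : Int), Dom_digit_product n → Spec_digit_product n (digit_product n)

-- ===== LEMMAS AND PROOFS =====

-- `Nat.toDigits` (what str() prints) is the base-10 digit list, reversed and rendered as chars.
lemma toDigitsCore_eq (fuel : Nat) : ∀ (m : Nat) (ds : List Char), m ≠ 0 → m < fuel →
    Nat.toDigitsCore 10 fuel m ds = ((Nat.digits 10 m).map Nat.digitChar).reverse ++ ds := by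
  induction fuel with
  | zero => intro m ds hm hf; omega
  | succ f ih =>
    intro m ds hm hf
    rw [Nat.digits_def' (by norm_num : 1 < 10) (Nat.pos_of_ne_zero hm)]
    simp only [Nat.toDigitsCore]
    by_cases h10 : m / 10 = 0
    · simp [h10, Nat.digits_zero]
    · rw [if_neg h10, ih (m / 10) _ h10
        (by have := Nat.div_lt_self (Nat.pos_of_ne_zero hm) (by norm_num : 1 < 10); omega)]
      simp

lemma toDigits_eq (m : Nat) (hm : m ≠ 0) :
    Nat.toDigits 10 m = ((Nat.digits 10 m).map Nat.digitChar).reverse := by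
  have := toDigitsCore_eq (m + 1) m [] hm (Nat.lt_succ_self m)
  simpa [Nat.toDigits] using this

lemma toChars_abs (n : Int) : PySem.Int.toChars |n| = Nat.toDigits 10 n.natAbs := by
  have h2 : (|n|).toNat = n.natAbs := by rw [Int.abs_eq_natAbs, Int.toNat_natCast]
  simp [PySem.Int.toChars, not_lt.mpr (abs_nonneg n), h2]

lemma digitChar_eq_zero_iff (d : Nat) (hd : d < 10) : Nat.digitChar d = '0' ↔ d = 0 := by
  interval_cases d <;> simp [Nat.digitChar]

lemma ofChars_digitChar (d : Nat) (hd : d < 10) :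
    (PySem.Int.ofChars? [Nat.digitChar d]).getD 0 = (d : Int) := by
  interval_cases d <;> decide

-- characterisation of A on a nonzero natAbs
lemma digit_product_char (n : Int) (hm : n.natAbs ≠ 0) :
    digit_product n =
      if 0 ∈ Nat.digits 10 n.natAbs then 0
      else ((Nat.digits 10 n.natAbs).map (fun (d : Nat) => (d : Int))).prod := by
  have hlt : ∀ d ∈ Nat.digits 10 n.natAbs, d < 10 :=
    fun d hd => Nat.digits_lt_base (by norm_num) hd
  unfold digit_product
  rw [toChars_abs, toDigits_eq _ hm]
  by_cases hz : 0 ∈ Nat.digits 10 n.natAbs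
  · rw [if_pos]
    · simp [if_pos hz]
    · simp only [List.mem_reverse, List.mem_map]
      exact ⟨0, hz, by decide⟩
  · rw [if_neg, if_neg hz]
    · have hmap : (((Nat.digits 10 n.natAbs).map Nat.digitChar).reverse.map
          (fun d => (PySem.Int.ofChars? [d]).getD 0))
          = ((Nat.digits 10 n.natAbs).map (fun (d : Nat) => (d : Int))).reverse := by
        rw [List.map_reverse, List.map_map]
        refine congrArg List.reverse ?_
        simp only [Function.comp_def]
        exact List.map_congr_left (fun d hd => ofChars_digitChar d (hlt d hd))
      calc ((Nat.digits 10 n.natAbs).map Nat.digitChar).reverse.foldl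
              (fun result d => result * ((PySem.Int.ofChars? [d]).getD 0)) 1
          = (((Nat.digits 10 n.natAbs).map Nat.digitChar).reverse.map
              (fun d => (PySem.Int.ofChars? [d]).getD 0)).foldl (· * ·) 1 := by
            rw [List.foldl_map]
        _ = ((Nat.digits 10 n.natAbs).map (fun (d : Nat) => (d : Int))).prod := by
            rw [hmap, ← List.prod_eq_foldl, List.prod_reverse]
    · simp only [List.mem_reverse, List.mem_map]
      rintro ⟨d, hd, hdc⟩
      exact hz (((digitChar_eq_zero_iff d (hlt d hd)).mp hdc) ▸ hd)

-- characterisation of B's loop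
lemma dpLoop_char (m : Nat) : ∀ (r : Int),
    dpLoop m r =
      if 0 ∈ Nat.digits 10 m then 0
      else r * ((Nat.digits 10 m).map (fun (d : Nat) => (d : Int))).prod := by
  induction m using Nat.strong_induction_on with
  | _ m ih =>
    intro r
    by_cases hm : m = 0
    · subst hm; simp [dpLoop]
    · rw [dpLoop, dif_neg hm,
        Nat.digits_def' (by norm_num : 1 < 10) (Nat.pos_of_ne_zero hm)]
      by_cases hd : m % 10 = 0
      · rw [if_pos hd, if_pos (List.mem_cons.mpr (Or.inl hd.symm))]
      · rw [if_neg hd, ih (m / 10)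
          (Nat.div_lt_self (Nat.pos_of_ne_zero hm) (by norm_num))]
        by_cases h0 : (0 : Nat) ∈ Nat.digits 10 (m / 10)
        · rw [if_pos h0, if_pos (List.mem_cons_of_mem _ h0)]
        · rw [if_neg h0, if_neg (fun h => by
            rcases List.mem_cons.mp h with h | h
            · exact hd h.symm
            · exact h0 h)]
          rw [List.map_cons, List.prod_cons]
          push_cast; ring

-- ===== VERDICT (by name: the statement is the Claim_ definition above) =====
theorem digit_product_spec : Claim_equal_digit_product := by
  intro n _
  unfold Spec_digit_product digit_product_alt
  by_cases hm : n.natAbs = 0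
  · have hn : n = 0 := Int.natAbs_eq_zero.mp hm
    subst hn; decide
  · rw [if_neg hm, dpLoop_char, digit_product_char n hm, one_mul]
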